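-- pv_equiv track=rewrite | github.com/SipakovV/fsm-code-generator | finite_automata/transducers/python_fsm_examples_manual/even_ones_dfa.py | parse
-- ===== SOURCE A (Python) =====
-- alphabet = {'0', '1'}
--
-- def parse(string: str) -> bool:
--     state = '0'
--
--     for ch in string:
--         if ch not in alphabet:
--             raise ValueError('Error: Invalid character')
--         if state == '0':
--             if ch == '0':
--                 state = '0'
--             elif ch == '1':
--                 state = '1'
--         elif state == '1':
--             if ch == '0':
--                 state = '1'
--             elif ch == '1':
--                 state = '0'
--
--     if state in {'0'}:
--         return True
--     else:
--         return False
-- ===== SOURCE B (Python) =====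
-- def parse(string: str) -> bool:
--     for ch in string:
--         if ch not in ('0', '1'):
--             raise ValueError('Error: Invalid character')
--     return string.count('1') % 2 == 0
-- ===== Notes on version B (the rewrite author's own statement) =====
-- stated objective: simpler
-- what changed: Replaces the DFA state machine (running parity state updated by explicit transition branches) with a validation pass followed by counting the ones and taking the count modulo 2.
import Mathlib
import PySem

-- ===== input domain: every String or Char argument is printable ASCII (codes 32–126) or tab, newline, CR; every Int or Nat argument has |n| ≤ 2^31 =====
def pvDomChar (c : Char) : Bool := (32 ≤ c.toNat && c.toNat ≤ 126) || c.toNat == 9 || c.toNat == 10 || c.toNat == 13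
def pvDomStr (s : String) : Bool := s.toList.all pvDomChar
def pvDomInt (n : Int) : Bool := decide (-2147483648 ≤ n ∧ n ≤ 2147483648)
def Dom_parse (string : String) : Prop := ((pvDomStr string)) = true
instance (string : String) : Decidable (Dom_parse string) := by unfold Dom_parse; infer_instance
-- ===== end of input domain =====

-- B replaces A's DFA state-transition loop by a validation pass plus counting the
-- ones modulo 2 (simpler); equivalence is about the return value on valid inputs.

-- ===== PORT A =====
-- one DFA step of A's loop body (the transition branches, in A's order)
def parseStep (state : String) (ch : Char) : String :=
  if state = "0" then
    if ch = '0' then "0" else if ch = '1' then "1" else state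
  else if state = "1" then
    if ch = '0' then "1" else if ch = '1' then "0" else state
  else state

def parse (string : String) : Bool :=
  let state := string.toList.foldl parseStep "0"
  if state = "0" then true else false

-- ===== PORT B =====
def parse_alt (string : String) : Bool :=
  string.toList.count '1' % 2 == 0

-- ===== PRECONDITION & SPEC =====
-- Pre_ excludes exactly the inputs where A raises ValueError (a character other than '0'/'1'); B raises there too.
def Pre_parse (string : String) : Prop := string.toList.all (fun c => c == '0' || c == '1') = true
instance (string : String) : Decidable (Pre_parse string) := by unfold Pre_parse; infer_instance
def pvWitness_parse : String := "0110"

def Spec_parse (string : String) (out : Bool) : Prop := out = parse_alt string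
instance (string : String) (out : Bool) : Decidable (Spec_parse string out) := by unfold Spec_parse; infer_instance

-- ===== CLAIM (what is proved, stated in full; the proofs are below) =====
def Claim_equal_parse : Prop := ∀ (string : String), Dom_parse string → Pre_parse string → Spec_parse string (parse string)

-- ===== LEMMAS AND PROOFS =====

-- loop invariant for A's fold: from state "0" or "1", the final state is "0"
-- iff the starting state matches the parity of ones in the remaining input
theorem parseStep_foldl (l : List Char) (s : String) (hs : s = "0" ∨ s = "1")
    (hl : ∀ c ∈ l, c = '0' ∨ c = '1') :
    (l.foldl parseStep s = "0") = ((s = "0") = (l.count '1' % 2 = 0)) := by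
  induction l generalizing s with
  | nil =>
    simp only [List.foldl_nil, List.count_nil]
    rcases hs with h | h <;> subst h <;> simp
  | cons c t ih =>
    have hc := hl c (by simp)
    have ht : ∀ x ∈ t, x = '0' ∨ x = '1' := fun x hx => hl x (by simp [hx])
    rcases hc with hc | hc <;> subst hc <;>
      rcases hs with h | h <;> subst h <;>
      simp only [List.foldl_cons, List.count_cons] <;>
      simp only [parseStep, if_pos, reduceIte,
        String.reduceEq, Char.reduceEq] <;>
      rw [ih _ (by simp) ht] <;> simp <;> omega

-- ===== VERDICT (by name: the statement is the Claim_ definition above) =====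
theorem parse_spec : Claim_equal_parse := by
  intro s _ hpre
  have hpre' : ∀ c ∈ s.toList, c = '0' ∨ c = '1' := by
    intro c hc
    have := List.all_eq_true.mp hpre c hc
    simpa using this
  unfold Spec_parse parse parse_alt
  simp only []
  rw [show (let state := s.toList.foldl parseStep "0"; if state = "0" then true else false) = (if s.toList.foldl parseStep "0" = "0" then true else false) from rfl]
  have h0 := parseStep_foldl s.toList "0" (Or.inl rfl) hpre'
  have hp : (s.toList.foldl parseStep "0" = "0") ↔ (s.toList.count '1' % 2 = 0) := by
    rw [h0]; simp
  split_ifs with h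
  · simp [hp.mp h]
  · have hc : s.toList.count '1' % 2 ≠ 0 := fun hc => h (hp.mpr hc)
    simp [hc]
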